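-- pv_equiv track=rewrite | github.com/ailabstw/variant2literature | gene_ner/features.py | get_count_features
-- ===== SOURCE A (Python) =====
-- def get_count_features(token: str) -> str:
--     """count digits and letters
--     """
--     num_d = sum(c.isdigit() for c in token)
--     f_num_d = 'N:{}'.format(num_d if num_d < 4 else '4+')
--
--     num_uc = sum(c.isupper() for c in token)
--     f_num_uc = 'U:{}'.format(num_uc if num_uc < 4 else '4+')
--
--     num_lc = sum(c.islower() for c in token)
--     f_num_lc = 'L:{}'.format(num_lc if num_lc < 4 else '4+')
--
--     num_c = len(token)
--     f_num_c = 'A:{}'.format(num_c if num_c < 4 else '4+')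
--     return ' '.join([f_num_d, f_num_uc, f_num_lc, f_num_c])
-- ===== SOURCE B (Python) =====
-- def get_count_features(token: str) -> str:
--     """count digits and letters"""
--     num_d = num_uc = num_lc = total = 0
--     for c in token:
--         if c.isdigit():
--             num_d += 1
--         if c.isupper():
--             num_uc += 1
--         if c.islower():
--             num_lc += 1
--         total += 1
--
--     def cap(n):
--         return str(n) if n < 4 else '4+'
--
--     return 'N:' + cap(num_d) + ' U:' + cap(num_uc) + ' L:' + cap(num_lc) + ' A:' + cap(total)
-- ===== Notes on version B (the rewrite author's own statement) =====
-- stated objective: alternative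
-- what changed: Replaces four separate passes (three sum-comprehensions plus len) with one loop over the characters maintaining four counters, and builds the result by direct concatenation instead of format/join.
import Mathlib
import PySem

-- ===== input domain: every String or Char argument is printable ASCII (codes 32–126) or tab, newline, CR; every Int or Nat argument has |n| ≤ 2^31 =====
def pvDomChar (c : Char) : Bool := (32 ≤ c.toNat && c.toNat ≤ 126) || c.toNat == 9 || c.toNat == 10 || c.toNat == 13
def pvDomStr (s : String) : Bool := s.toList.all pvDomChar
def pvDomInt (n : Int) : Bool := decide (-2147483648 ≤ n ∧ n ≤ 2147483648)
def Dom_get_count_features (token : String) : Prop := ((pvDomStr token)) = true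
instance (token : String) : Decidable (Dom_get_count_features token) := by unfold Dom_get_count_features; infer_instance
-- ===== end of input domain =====

-- B replaces A's four separate passes (three sum-comprehensions plus len) with one loop
-- maintaining four counters, building the result by direct concatenation (objective: alternative).


-- ===== PORT A =====
-- 'X:{}'.format(n if n < 4 else '4+')
def pvFmtA (tag : Char) (n : Int) : List Char :=
  tag :: ':' :: (if n < 4 then PySem.Int.toChars n else ['4', '+'])

def get_count_features (token : String) : String :=
  let num_d : Int := (token.toList.map (fun c => if PySem.Chars.isdigit c then (1 : Int) else 0)).sum
  let f_num_d := pvFmtA 'N' num_d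
  let num_uc : Int := (token.toList.map (fun c => if PySem.Chars.isupper c then (1 : Int) else 0)).sum
  let f_num_uc := pvFmtA 'U' num_uc
  let num_lc : Int := (token.toList.map (fun c => if PySem.Chars.islower c then (1 : Int) else 0)).sum
  let f_num_lc := pvFmtA 'L' num_lc
  let num_c : Int := PySem.Str.len token
  let f_num_c := pvFmtA 'A' num_c
  String.mk (PySem.Chars.join [' '] [f_num_d, f_num_uc, f_num_lc, f_num_c])

-- ===== PORT B =====
-- one step of the single loop: bump each counter that applies
def pvStepB (s : Int × Int × Int × Int) (c : Char) : Int × Int × Int × Int :=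
  let s1 := if PySem.Chars.isdigit c then (s.1 + 1, s.2.1, s.2.2.1, s.2.2.2) else s
  let s2 := if PySem.Chars.isupper c then (s1.1, s1.2.1 + 1, s1.2.2.1, s1.2.2.2) else s1
  let s3 := if PySem.Chars.islower c then (s2.1, s2.2.1, s2.2.2.1 + 1, s2.2.2.2) else s2
  (s3.1, s3.2.1, s3.2.2.1, s3.2.2.2 + 1)

def pvCapB (n : Int) : List Char :=
  if n < 4 then PySem.Int.toChars n else ['4', '+']

def get_count_features_alt (token : String) : String :=
  let s := token.toList.foldl pvStepB (0, 0, 0, 0)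
  String.mk (['N', ':'] ++ pvCapB s.1 ++ [' ', 'U', ':'] ++ pvCapB s.2.1
    ++ [' ', 'L', ':'] ++ pvCapB s.2.2.1 ++ [' ', 'A', ':'] ++ pvCapB s.2.2.2)

-- ===== PRECONDITION & SPEC =====
def Spec_get_count_features (token : String) (out : String) : Prop := out = get_count_features_alt token
instance (token : String) (out : String) : Decidable (Spec_get_count_features token out) := by unfold Spec_get_count_features; infer_instance

-- ===== CLAIM (what is proved, stated in full; the proofs are below) =====
def Claim_equal_get_count_features : Prop := ∀ (token : String), Dom_get_count_features token → Spec_get_count_features token (get_count_features token)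

-- ===== LEMMAS AND PROOFS =====

/-- The single loop of B computes the four sums A computes separately. -/
theorem pv_foldl_stepB (cs : List Char) (d u l t : Int) :
    cs.foldl pvStepB (d, u, l, t) =
      (d + (cs.map (fun c => if PySem.Chars.isdigit c then (1 : Int) else 0)).sum,
       u + (cs.map (fun c => if PySem.Chars.isupper c then (1 : Int) else 0)).sum,
       l + (cs.map (fun c => if PySem.Chars.islower c then (1 : Int) else 0)).sum,
       t + (cs.length : Int)) := by
  induction cs generalizing d u l t with
  | nil => simp
  | cons c cs ih =>
    simp only [List.foldl_cons, List.map_cons, List.sum_cons, List.length_cons, pvStepB]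
    split_ifs <;> simp [ih] <;> ring_nf <;> simp

-- ===== VERDICT (by name: the statement is the Claim_ definition above) =====
theorem get_count_features_spec : Claim_equal_get_count_features := by
  intro token _
  unfold Spec_get_count_features get_count_features get_count_features_alt
  simp [pv_foldl_stepB, pvFmtA, pvCapB, PySem.Chars.join, List.intercalate,
    List.intersperse, List.append_assoc]
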